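-- pv_equiv track=rewrite | github.com/dansalvato/melee-gci-compiler | mgc/pyiiasmh/ppctools.py | format_rawhex
-- ===== SOURCE A (Python) =====
-- def format_rawhex(rawhex):
--     #Format raw hex into readable Gecko/WiiRd codes
--     code = []
--
--     for i in range(0, len(rawhex), 8):
--         code.append(rawhex[i:(i+8)])
--
--     for i in range(1, len(code), 2):
--         code[i] += "\n"
--     for i in range(0, len(code), 2):
--         code[i] += " "
--
--     return "".join(code)
-- ===== SOURCE B (Python) =====
-- def format_rawhex(rawhex):
--     # Single pass over 16-char slices: build each finished line directly, then join.
--     out = []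
--     for i in range(0, len(rawhex), 16):
--         seg = rawhex[i:(i + 16)]
--         if len(seg) > 8:
--             line = seg[:8] + " " + seg[8:] + "\n"
--         else:
--             line = seg + " "
--         out.append(line)
--     return "".join(out)
-- ===== Notes on version B (the rewrite author's own statement) =====
-- stated objective: simpler
-- what changed: One pass over 16-character slices that emits each finished line directly, replacing A's three passes (chunk into a list, mutate odd indices with newlines, mutate even indices with spaces) and the final join of mutated chunks.
import Mathlib
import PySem

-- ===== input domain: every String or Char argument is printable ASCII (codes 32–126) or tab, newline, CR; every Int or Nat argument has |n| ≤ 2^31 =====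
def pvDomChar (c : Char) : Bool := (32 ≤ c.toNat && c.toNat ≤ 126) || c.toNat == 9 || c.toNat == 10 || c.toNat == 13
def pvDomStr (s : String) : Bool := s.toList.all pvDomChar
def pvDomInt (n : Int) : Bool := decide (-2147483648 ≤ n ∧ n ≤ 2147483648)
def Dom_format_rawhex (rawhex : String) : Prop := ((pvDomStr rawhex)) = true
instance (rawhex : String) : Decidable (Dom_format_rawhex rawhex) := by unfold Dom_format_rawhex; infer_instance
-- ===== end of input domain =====

-- B replaces A's three passes (chunk list, newline pass over odd indices, space pass over
-- even indices, join) with a single pass over 16-character slices that emits each line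
-- directly; objective: simpler.


-- ===== PORT A =====
-- Strings are handled on the code-point list (PySem.Chars); "".join is PySem.Chars.join.
-- The list assignments code[i] += "…" read and write a non-negative in-range index
-- produced by range(), so List.getD / List.set at i.toNat are exact there.
def format_rawhex (rawhex : String) : String :=
  let s := rawhex.toList
  -- for i in range(0, len(rawhex), 8): code.append(rawhex[i:(i+8)])
  let code : List (List Char) :=
    (PySem.List.pyRange 0 (s.length : Int) 8).foldl
      (fun acc i => acc ++ [PySem.List.slice s (some i) (some (i + 8))]) []
  -- for i in range(1, len(code), 2): code[i] += "\n"
  let code :=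
    (PySem.List.pyRange 1 (code.length : Int) 2).foldl
      (fun c i => c.set i.toNat ((c.getD i.toNat []) ++ ['\n'])) code
  -- for i in range(0, len(code), 2): code[i] += " "
  let code :=
    (PySem.List.pyRange 0 (code.length : Int) 2).foldl
      (fun c i => c.set i.toNat ((c.getD i.toNat []) ++ [' '])) code
  String.ofList (PySem.Chars.join [] code)

-- ===== PORT B =====
def format_rawhex_alt (rawhex : String) : String :=
  let s := rawhex.toList
  let out : List (List Char) :=
    (PySem.List.pyRange 0 (s.length : Int) 16).foldl
      (fun acc i =>
        let seg := PySem.List.slice s (some i) (some (i + 16))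
        let line :=
          if 8 < seg.length then
            PySem.List.slice seg none (some 8) ++ [' ']
              ++ PySem.List.slice seg (some 8) none ++ ['\n']
          else
            seg ++ [' ']
        acc ++ [line]) []
  String.ofList (PySem.Chars.join [] out)

-- ===== PRECONDITION & SPEC =====
def Spec_format_rawhex (rawhex : String) (out : String) : Prop := out = format_rawhex_alt rawhex
instance (rawhex : String) (out : String) : Decidable (Spec_format_rawhex rawhex out) := by unfold Spec_format_rawhex; infer_instance

-- ===== CLAIM (what is proved, stated in full; the proofs are below) =====
def Claim_equal_format_rawhex : Prop := ∀ (rawhex : String), Dom_format_rawhex rawhex → Spec_format_rawhex rawhex (format_rawhex rawhex)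

-- ===== LEMMAS AND PROOFS =====

-- proof-side spec: the chunk list A builds
def pvChunk8 (s : List Char) : List (List Char) :=
  if h : s = [] then [] else s.take 8 :: pvChunk8 (s.drop 8)
termination_by s.length
decreasing_by
  simp only [List.length_drop]
  have : 0 < s.length := List.length_pos_iff.mpr h
  omega

-- proof-side spec: the formatted text, one 16-char line at a time
def pvFmt (s : List Char) : List Char :=
  if h1 : s = [] then []
  else if h2 : s.length ≤ 8 then s ++ [' ']
  else s.take 8 ++ [' '] ++ (s.drop 8).take 8 ++ ['\n'] ++ pvFmt (s.drop 16)
termination_by s.length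
decreasing_by
  simp only [List.length_drop]
  omega

lemma pvChunk8_nil : pvChunk8 [] = [] := by rw [pvChunk8]; rfl

lemma pvFmt_nil : pvFmt [] = [] := by rw [pvFmt]; rfl

lemma pv_range_map_chunk (m : Nat) (s : List Char) (hm : m = (s.length + 7) / 8) :
    (List.range m).map (fun k => (s.drop (8 * k)).take 8) = pvChunk8 s := by
  induction m generalizing s with
  | zero =>
      have hs : s = [] := List.eq_nil_of_length_eq_zero (by omega)
      subst hs
      simp [pvChunk8_nil]
  | succ m ih =>
      have hlen : 1 ≤ s.length := by
        by_contra h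
        have h0 : s.length = 0 := by omega
        simp [h0] at hm
      have hne : s ≠ [] := by
        intro h; subst h; simp at hlen
      rw [List.range_succ_eq_map, List.map_cons, List.map_map, pvChunk8, dif_neg hne]
      have hfun : ((fun k => (s.drop (8 * k)).take 8) ∘ Nat.succ)
          = fun k => ((s.drop 8).drop (8 * k)).take 8 := by
        funext k
        simp only [Function.comp, List.drop_drop]
        congr 2
        omega
      rw [hfun, ih (s.drop 8) (by simp only [List.length_drop]; omega)]
      simp only [Nat.mul_zero, List.drop_zero]

lemma pv_setloop_aux (r : Nat) (hr : r < 2) (suf : List Char) (m : Nat)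
    (code : List (List Char)) (hb : r + 2 * m ≤ code.length + 1) :
    (List.range m).foldl
      (fun c k => c.set (r + 2 * k) ((c.getD (r + 2 * k) []) ++ suf)) code
    = code.mapIdx (fun k x => if k % 2 = r ∧ k < r + 2 * m then x ++ suf else x) := by
  induction m with
  | zero =>
      simp only [List.range_zero, List.foldl_nil]
      apply List.ext_getElem (by simp)
      intro i h1 h2
      rw [List.getElem_mapIdx]
      rw [if_neg (by omega)]
  | succ m ih =>
      rw [List.range_succ, List.foldl_append, ih (by omega)]
      simp only [List.foldl_cons, List.foldl_nil]
      have hjlen : r + 2 * m < code.length := by omega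
      have hget : ((code.mapIdx (fun k x => if k % 2 = r ∧ k < r + 2 * m then x ++ suf else x)).getD
          (r + 2 * m) []) = code[r + 2 * m] := by
        rw [List.getD_eq_getElem _ _ (by simpa using hjlen)]
        rw [List.getElem_mapIdx, if_neg (by omega)]
      rw [hget]
      apply List.ext_getElem (by simp)
      intro i h1 h2
      have hi : i < code.length := by simpa using h2
      rw [List.getElem_set]
      by_cases hij : r + 2 * m = i
      · rw [if_pos hij]
        rw [List.getElem_mapIdx, if_pos (by omega)]
        subst hij; rfl
      · rw [if_neg hij]
        rw [List.getElem_mapIdx, List.getElem_mapIdx]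
        split_ifs with h3 h4 h4 <;> first | rfl | (exfalso; omega)

lemma pv_setloop (r : Nat) (hr : r < 2) (suf : List Char) (code : List (List Char)) :
    (PySem.List.pyRange (r : Int) (code.length : Int) 2).foldl
      (fun c i => c.set i.toNat ((c.getD i.toNat []) ++ suf)) code
    = code.mapIdx (fun k x => if k % 2 = r then x ++ suf else x) := by
  rw [PySem.List.pyRange_of_pos _ _ (by omega), List.foldl_map]
  have hfun : (fun (c : List (List Char)) (k : Nat) =>
        c.set ((r : Int) + 2 * (k : Int)).toNat ((c.getD ((r : Int) + 2 * (k : Int)).toNat []) ++ suf))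
      = fun c k => c.set (r + 2 * k) ((c.getD (r + 2 * k) []) ++ suf) := by
    funext c k
    have h : ((r : Int) + 2 * (k : Int)).toNat = r + 2 * k := by omega
    rw [h]
  rw [hfun]
  have hb : r + 2 * (if (r : Int) < (code.length : Int) then
      (((code.length : Int) - (r : Int) + 2 - 1) / 2).toNat else 0) ≤ code.length + 1 := by
    split_ifs with h <;> omega
  rw [pv_setloop_aux r hr suf _ code hb]
  apply List.ext_getElem (by simp)
  intro i h1 h2
  have hi : i < code.length := by simpa using h1
  rw [List.getElem_mapIdx, List.getElem_mapIdx]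
  by_cases hpar : i % 2 = r
  · rw [if_pos hpar]
    rw [if_pos ⟨hpar, by split_ifs with h <;> omega⟩]
  · rw [if_neg hpar, if_neg (by intro hc; exact hpar hc.1)]

lemma pv_join_nil (l : List (List Char)) : PySem.Chars.join [] l = l.flatten := by
  suffices h : (List.intersperse ([] : List Char) l).flatten = l.flatten by
    simpa [PySem.Chars.join, List.intercalate] using h
  induction l with
  | nil => simp
  | cons a t ih =>
      cases t with
      | nil => simp [List.intersperse]
      | cons b u =>
          rw [show List.intersperse ([] : List Char) (a :: b :: u)
                = a :: [] :: List.intersperse [] (b :: u) from by simp [List.intersperse]]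
          simp only [List.flatten_cons] at ih ⊢
          rw [ih]
          simp

lemma pv_mapIdx_mapIdx {α β γ : Type} (f : Nat → α → β) (g : Nat → β → γ) (l : List α) :
    (l.mapIdx f).mapIdx g = l.mapIdx (fun k x => g k (f k x)) := by
  apply List.ext_getElem (by simp)
  intro i h1 h2
  rw [List.getElem_mapIdx, List.getElem_mapIdx, List.getElem_mapIdx]

lemma pv_flatten_parity (s : List Char) :
    (List.mapIdx (fun k x => if k % 2 = 1 then x ++ ['\n'] else x ++ [' ']) (pvChunk8 s)).flatten
    = pvFmt s := by
  induction s using pvFmt.induct with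
  | case1 =>
      rw [pvChunk8_nil, pvFmt_nil]
      simp
  | case2 s h1 h2 =>
      rw [pvChunk8, dif_neg h1]
      have hdrop : s.drop 8 = [] := List.drop_eq_nil_of_le h2
      rw [hdrop, pvChunk8_nil]
      have htake : s.take 8 = s := List.take_of_length_le h2
      rw [pvFmt, dif_neg h1, dif_pos h2]
      simp [htake]
  | case3 s h1 h2 ih =>
      have hne2 : s.drop 8 ≠ [] := by
        intro h
        have h' := congrArg List.length h
        simp only [List.length_drop, List.length_nil] at h'
        omega
      rw [pvChunk8, dif_neg h1, pvChunk8, dif_neg hne2]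
      rw [List.mapIdx_cons, List.mapIdx_cons]
      have hshift : ∀ (k : Nat) (x : List Char),
          (if (k + 1 + 1) % 2 = 1 then x ++ ['\n'] else x ++ [' '])
          = (if k % 2 = 1 then x ++ ['\n'] else x ++ [' ']) := by
        intro k x
        have h : (k + 1 + 1) % 2 = k % 2 := by omega
        rw [h]
      simp only [hshift]
      rw [show List.drop 8 (List.drop 8 s) = List.drop 16 s from by rw [List.drop_drop]]
      simp only [List.flatten_cons]
      rw [ih]
      conv_rhs => rw [pvFmt]
      rw [dif_neg h1, dif_neg h2]
      simp [List.append_assoc]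

lemma pv_A_core (s : List Char) :
    ((pvChunk8 s).mapIdx (fun k x => if k % 2 = 1 then x ++ ['\n'] else x)).mapIdx
      (fun k x => if k % 2 = 0 then x ++ [' '] else x)
    = List.mapIdx (fun k x => if k % 2 = 1 then x ++ ['\n'] else x ++ [' ']) (pvChunk8 s) := by
  rw [pv_mapIdx_mapIdx]
  apply List.ext_getElem (by simp)
  intro i h1 h2
  rw [List.getElem_mapIdx, List.getElem_mapIdx]
  rcases Nat.mod_two_eq_zero_or_one i with h | h <;> simp [h]

lemma pv_B_core (m : Nat) (s : List Char) (hm : m = (s.length + 15) / 16) :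
    ((List.range m).map (fun k =>
        if 8 < ((s.drop (16 * k)).take 16).length then
          ((s.drop (16 * k)).take 16).take 8 ++ [' ']
            ++ ((s.drop (16 * k)).take 16).drop 8 ++ ['\n']
        else
          (s.drop (16 * k)).take 16 ++ [' '])).flatten
    = pvFmt s := by
  induction m generalizing s with
  | zero =>
      have hs : s = [] := List.eq_nil_of_length_eq_zero (by omega)
      subst hs
      rw [pvFmt_nil]
      simp
  | succ m ih =>
      have hlen : 1 ≤ s.length := by
        by_contra h
        have h0 : s.length = 0 := by omega
        simp [h0] at hm
      have hne : s ≠ [] := by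
        intro h; subst h; simp at hlen
      rw [List.range_succ_eq_map, List.map_cons, List.map_map, List.flatten_cons]
      have hfun : ((fun k =>
            if 8 < ((s.drop (16 * k)).take 16).length then
              ((s.drop (16 * k)).take 16).take 8 ++ [' ']
                ++ ((s.drop (16 * k)).take 16).drop 8 ++ ['\n']
            else
              (s.drop (16 * k)).take 16 ++ [' ']) ∘ Nat.succ)
          = fun k =>
            if 8 < (((s.drop 16).drop (16 * k)).take 16).length then
              (((s.drop 16).drop (16 * k)).take 16).take 8 ++ [' ']
                ++ (((s.drop 16).drop (16 * k)).take 16).drop 8 ++ ['\n']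
            else
              ((s.drop 16).drop (16 * k)).take 16 ++ [' '] := by
        funext k
        have h16 : List.drop (16 * Nat.succ k) s = (s.drop 16).drop (16 * k) := by
          rw [List.drop_drop]
          congr 1
          omega
        simp only [Function.comp, h16]
      rw [hfun, ih (s.drop 16) (by simp only [List.length_drop]; omega)]
      simp only [Nat.mul_zero, List.drop_zero]
      by_cases h8 : s.length ≤ 8
      · have hseg : s.take 16 = s := List.take_of_length_le (by omega)
        rw [hseg, if_neg (by omega)]
        have hfmt0 : pvFmt (s.drop 16) = [] := by
          have hd : s.drop 16 = [] := List.drop_eq_nil_of_le (by omega)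
          rw [hd, pvFmt_nil]
        rw [hfmt0, pvFmt, dif_neg hne, dif_pos h8]
        simp
      · have hlenseg : (s.take 16).length = min 16 s.length := by simp
        rw [if_pos (by rw [hlenseg]; omega)]
        rw [List.take_take, List.drop_take]
        conv_rhs => rw [pvFmt]
        rw [dif_neg hne, dif_neg h8]
        norm_num

lemma pv_count8 (s : List Char) :
    (if (0 : Int) < (s.length : Int) then
        (((s.length : Int) - 0 + 8 - 1) / 8).toNat else 0) = (s.length + 7) / 8 := by
  split_ifs with h <;> omega

lemma pv_count16 (s : List Char) :
    (if (0 : Int) < (s.length : Int) then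
        (((s.length : Int) - 0 + 16 - 1) / 16).toNat else 0) = (s.length + 15) / 16 := by
  split_ifs with h <;> omega

-- ===== VERDICT (by name: the statement is the Claim_ definition above) =====
set_option maxHeartbeats 1000000 in
theorem format_rawhex_spec : Claim_equal_format_rawhex := by
  intro rawhex _
  unfold Spec_format_rawhex
  simp only [format_rawhex, format_rawhex_alt]
  set s := rawhex.toList with hs
  refine congrArg String.ofList ?_
  rw [pv_join_nil, pv_join_nil]
  -- A side
  rw [PySem.List.foldl_append_singleton_eq_map, List.nil_append]
  rw [PySem.List.pyRange_of_pos _ _ (by omega : (0:Int) < 8), List.map_map]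
  have hfunA : ((fun i => PySem.List.slice s (some i) (some (i + 8))) ∘ fun k : Nat => 0 + 8 * (k : Int))
      = fun k : Nat => (s.drop (8 * k)).take 8 := by
    funext k
    simp only [Function.comp]
    rw [show (0 : Int) + 8 * (k : Int) = ((8 * k : Nat) : Int) from by push_cast; ring]
    rw [show ((8 * k : Nat) : Int) + 8 = ((8 * k : Nat) : Int) + ((8 : Nat) : Int) from by norm_num]
    rw [PySem.List.slice_natCast_add]
  rw [hfunA, pv_count8, pv_range_map_chunk _ s rfl]
  have h1 := pv_setloop 1 (by omega) ['\n'] (pvChunk8 s)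
  rw [Nat.cast_one] at h1
  rw [h1]
  have h0 := pv_setloop 0 (by omega) [' ']
      ((pvChunk8 s).mapIdx (fun k x => if k % 2 = 1 then x ++ ['\n'] else x))
  rw [Nat.cast_zero] at h0
  rw [h0, pv_A_core, pv_flatten_parity]
  -- B side
  rw [PySem.List.foldl_append_singleton_eq_map, List.nil_append]
  rw [PySem.List.pyRange_of_pos _ _ (by omega : (0:Int) < 16), List.map_map]
  have hfunB : ((fun i =>
        if 8 < (PySem.List.slice s (some i) (some (i + 16))).length then
          PySem.List.slice (PySem.List.slice s (some i) (some (i + 16))) none (some 8) ++ [' ']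
            ++ PySem.List.slice (PySem.List.slice s (some i) (some (i + 16))) (some 8) none ++ ['\n']
        else
          PySem.List.slice s (some i) (some (i + 16)) ++ [' ']) ∘ fun k : Nat => 0 + 16 * (k : Int))
      = fun k : Nat =>
        if 8 < ((s.drop (16 * k)).take 16).length then
          ((s.drop (16 * k)).take 16).take 8 ++ [' ']
            ++ ((s.drop (16 * k)).take 16).drop 8 ++ ['\n']
        else
          (s.drop (16 * k)).take 16 ++ [' '] := by
    funext k
    simp only [Function.comp]
    rw [show (0 : Int) + 16 * (k : Int) = ((16 * k : Nat) : Int) from by push_cast; ring]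
    rw [show ((16 * k : Nat) : Int) + 16 = ((16 * k : Nat) : Int) + ((16 : Nat) : Int) from by
      norm_num]
    rw [PySem.List.slice_natCast_add]
    rw [show (8 : Int) = ((8 : Nat) : Int) from by norm_num]
    rw [PySem.List.slice_to_natCast, PySem.List.slice_from_natCast]
  rw [hfunB, pv_count16]
  exact (pv_B_core _ s rfl).symm
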